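-- pv_equiv track=rewrite | github.com/zhenfelix/OnlineJudgeCodings | LeetCode/2511. Maximum Enemy Forts That Can Be Captured/solution.py | captureForts
-- ===== SOURCE A (Python) =====
-- from typing import List
--
-- def captureForts(forts: List[int]) -> int:
--     ans, cnt = 0, 0
--     pre = -2
--     for ch in forts:
--         if ch == 0:
--             cnt += 1
--         else:
--             if pre*ch == -1:
--                 ans = max(ans, cnt)
--             pre = ch
--             cnt = 0
--     return ans
-- ===== SOURCE B (Python) =====
-- from typing import List
--
-- def captureForts(forts: List[int]) -> int:
--     pos = [(i, f) for i, f in enumerate(forts) if f != 0]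
--     ans = 0
--     for (i, fi), (j, fj) in zip(pos, pos[1:]):
--         if fi * fj == -1:
--             ans = max(ans, j - i - 1)
--     return ans
-- ===== Notes on version B (the rewrite author's own statement) =====
-- stated objective: alternative
-- what changed: Replaces A's streaming running-zero-count with previous-fort state by first building the index table of non-zero forts and then scanning adjacent index pairs, taking the gap size when the pair has product -1.
import Mathlib
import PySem

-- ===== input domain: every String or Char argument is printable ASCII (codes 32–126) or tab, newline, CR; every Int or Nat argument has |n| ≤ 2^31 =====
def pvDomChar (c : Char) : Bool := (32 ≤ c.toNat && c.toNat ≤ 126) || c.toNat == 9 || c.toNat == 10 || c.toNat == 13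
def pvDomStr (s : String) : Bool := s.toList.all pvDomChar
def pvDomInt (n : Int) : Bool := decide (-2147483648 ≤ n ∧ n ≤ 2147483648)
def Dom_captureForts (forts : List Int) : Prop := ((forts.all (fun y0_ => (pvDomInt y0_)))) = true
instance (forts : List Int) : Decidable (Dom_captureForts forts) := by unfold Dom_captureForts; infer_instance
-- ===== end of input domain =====

-- B replaces A's streaming zero-counter with an index table of the non-zero forts
-- scanned pairwise (objective: alternative decomposition; same asymptotic cost).

-- ===== PORT A =====
def captureForts (forts : List Int) : Int :=
  let r := forts.foldl (fun (s : Int × Int × Int) ch =>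
    let (ans, cnt, pre) := s
    if ch = 0 then (ans, cnt + 1, pre)
    else (if pre * ch = -1 then max ans cnt else ans, 0, ch)) (0, 0, -2)
  r.1

-- ===== PORT B =====
-- pos = [(i, f) for i, f in enumerate(forts) if f != 0]
def altPos : List Int → Int → List (Int × Int)
  | [], _ => []
  | f :: rest, i => if f ≠ 0 then (i, f) :: altPos rest (i + 1) else altPos rest (i + 1)

def captureForts_alt (forts : List Int) : Int :=
  let pos := altPos forts 0
  (pos.zip pos.tail).foldl (fun ans p =>
    if p.1.2 * p.2.2 = -1 then max ans (p.2.1 - p.1.1 - 1) else ans) 0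

-- ===== PRECONDITION & SPEC =====
def Spec_captureForts (forts : List Int) (out : Int) : Prop := out = captureForts_alt forts
instance (forts : List Int) (out : Int) : Decidable (Spec_captureForts forts out) := by unfold Spec_captureForts; infer_instance

-- ===== CLAIM (what is proved, stated in full; the proofs are below) =====
def Claim_equal_captureForts : Prop := ∀ (forts : List Int), Dom_captureForts forts → Spec_captureForts forts (captureForts forts)

-- ===== LEMMAS AND PROOFS =====

-- adjacent-pair scan as a recursion over pos
def foldPairs : Int → List (Int × Int) → Int
  | ans, a :: b :: rest =>
      foldPairs (if a.2 * b.2 = -1 then max ans (b.1 - a.1 - 1) else ans) (b :: rest)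
  | ans, _ => ans

theorem zip_tail_eq_foldPairs (pos : List (Int × Int)) (ans : Int) :
    (pos.zip pos.tail).foldl (fun ans p =>
      if p.1.2 * p.2.2 = -1 then max ans (p.2.1 - p.1.1 - 1) else ans) ans
      = foldPairs ans pos := by
  induction pos generalizing ans with
  | nil => simp [foldPairs]
  | cons a tl ih =>
      cases tl with
      | nil => simp [foldPairs]
      | cons b rest =>
          simp only [List.tail_cons, List.zip_cons_cons, List.foldl_cons, foldPairs]
          exact ih _

theorem main_inv (forts : List Int) :
    ∀ (i ans ip fp : Int),
    (forts.foldl (fun (s : Int × Int × Int) ch =>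
      let (ans, cnt, pre) := s
      if ch = 0 then (ans, cnt + 1, pre)
      else (if pre * ch = -1 then max ans cnt else ans, 0, ch)) (ans, i - ip - 1, fp)).1
    = foldPairs ans ((ip, fp) :: altPos forts i) := by
  induction forts with
  | nil => intro i ans ip fp; simp [foldPairs, altPos]
  | cons f rest ih =>
      intro i ans ip fp
      by_cases h : f = 0
      · subst h
        have h2 := ih (i + 1) ans ip fp
        rw [show i + 1 - ip - 1 = i - ip - 1 + 1 by ring] at h2
        simpa [altPos, List.foldl_cons] using h2
      · have h2 := ih (i + 1) (if fp * f = -1 then max ans (i - ip - 1) else ans) i f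
        rw [show i + 1 - i - 1 = (0 : Int) by ring] at h2
        simp only [List.foldl_cons, altPos, ne_eq, h, not_false_eq_true, if_true]
        exact h2.trans rfl

theorem drop_sentinel (pos : List (Int × Int)) (ans : Int) :
    foldPairs ans ((-1, -2) :: pos) = foldPairs ans pos := by
  cases pos with
  | nil => rfl
  | cons b rest =>
      simp only [foldPairs]
      have : ¬ ((-2 : Int) * b.2 = -1) := by omega
      rw [if_neg this]

-- ===== VERDICT (by name: the statement is the Claim_ definition above) =====
theorem captureForts_spec : Claim_equal_captureForts := by
  intro forts _
  have h := main_inv forts 0 0 (-1) (-2)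
  rw [show (0 : Int) - (-1) - 1 = 0 by ring] at h
  unfold Spec_captureForts captureForts captureForts_alt
  rw [zip_tail_eq_foldPairs]
  exact h.trans (drop_sentinel _ _)
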